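-- pv_equiv track=rewrite | github.com/Y-XT/Second | tools/uavula/pred_eval_uavula.py | _infer_spidepth_num_layers_from_encoder_sd
-- ===== SOURCE A (Python) =====
-- from typing import Dict, List, Optional, Tuple
--
-- def _infer_spidepth_num_layers_from_encoder_sd(enc_sd: Dict[str, object]) -> int:
--     keys = [k for k in enc_sd.keys() if isinstance(k, str)]
--
--     def _layer_block_count(layer_idx: int) -> int:
--         prefix = f"encoder.encoder.layer{layer_idx}."
--         block_ids = []
--         for k in keys:
--             if not k.startswith(prefix):
--                 continue
--             tail = k[len(prefix):]
--             block = tail.split(".", 1)[0]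
--             if block.isdigit():
--                 block_ids.append(int(block))
--         return (max(block_ids) + 1) if block_ids else 0
--
--     layout = tuple(_layer_block_count(i) for i in (1, 2, 3, 4))
--     has_bottleneck = any(k.startswith("encoder.encoder.layer") and ".conv3." in k for k in keys)
--     if layout == (2, 2, 2, 2):
--         return 18
--     if layout == (3, 4, 6, 3):
--         return 50 if has_bottleneck else 34
--     if layout == (3, 4, 23, 3):
--         return 101
--     if layout == (3, 8, 36, 3):
--         return 152
--     return 50 if has_bottleneck else 18
-- ===== SOURCE B (Python) =====
-- def _infer_spidepth_num_layers_from_encoder_sd(enc_sd):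
--     PREFIX = "encoder.encoder.layer"
--     best = {}
--     has_bottleneck = False
--     for k in enc_sd.keys():
--         if not (isinstance(k, str) and k.startswith(PREFIX)):
--             continue
--         if ".conv3." in k:
--             has_bottleneck = True
--         parts = k[len(PREFIX):].split(".", 1)
--         if len(parts) == 2 and parts[0] in ("1", "2", "3", "4"):
--             block = parts[1].split(".", 1)[0]
--             if block.isdigit():
--                 i = int(parts[0])
--                 b = int(block)
--                 if i not in best or best[i] < b:
--                     best[i] = b
--     layout = tuple((best[i] + 1) if i in best else 0 for i in (1, 2, 3, 4))
--     if layout == (2, 2, 2, 2):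
--         return 18
--     if layout == (3, 4, 6, 3):
--         return 50 if has_bottleneck else 34
--     if layout == (3, 4, 23, 3):
--         return 101
--     if layout == (3, 8, 36, 3):
--         return 152
--     return 50 if has_bottleneck else 18
-- ===== Notes on version B (the rewrite author's own statement) =====
-- stated objective: faster
-- what changed: A scans the full key list four times (once per layer prefix) plus a fifth any-pass; B makes a single pass that parses each key once into (layer, block), maintaining a dict of running per-layer block maxima and the bottleneck flag, then reads the layout from the dict.
import Mathlib
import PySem

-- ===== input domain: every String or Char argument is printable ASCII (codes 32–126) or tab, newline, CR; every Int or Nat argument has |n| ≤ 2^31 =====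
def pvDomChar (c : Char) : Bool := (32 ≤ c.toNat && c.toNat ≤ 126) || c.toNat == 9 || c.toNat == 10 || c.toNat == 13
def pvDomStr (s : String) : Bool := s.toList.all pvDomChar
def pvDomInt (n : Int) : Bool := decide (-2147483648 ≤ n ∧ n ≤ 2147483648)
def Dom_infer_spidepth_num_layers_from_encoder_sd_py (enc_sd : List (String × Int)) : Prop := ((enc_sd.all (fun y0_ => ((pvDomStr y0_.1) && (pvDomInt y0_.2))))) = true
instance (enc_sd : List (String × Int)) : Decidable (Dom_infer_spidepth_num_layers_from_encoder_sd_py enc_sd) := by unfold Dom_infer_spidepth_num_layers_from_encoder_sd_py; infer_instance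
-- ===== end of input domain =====

-- B replaces A's four full scans of the key list (one per layer) by a single pass that parses each
-- key once into (layer, block) and keeps a dict of running per-layer maxima; same return value.

-- ===== PORT A =====
-- A's inner helper _layer_block_count: one full scan of keys per layer index.
def pvLayerBlockCount (keys : List String) (layer_idx : Int) : Int :=
  let pfx := "encoder.encoder.layer" ++ PySem.Int.toStr layer_idx ++ "."
  let block_ids : List Int := keys.foldl (fun ids k =>
    if !(PySem.Str.startswith k pfx) then ids
    else
      let tail := PySem.Str.slice k (some ((PySem.Str.len pfx : Int))) none
      -- tail.split(".", 1)[0]: sep ≠ "" so splitMax? is some, and the result is never empty,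
      -- so the [0] indexing never raises; getD/headD defaults are unreachable.
      let block := ((PySem.Str.splitMax? tail "." 1).getD []).headD ""
      if PySem.Str.strIsdigit block then ids ++ [(PySem.Int.ofStr? block).getD 0] else ids) []
  match PySem.List.max? block_ids id with
  | some m => m + 1
  | none => 0

def infer_spidepth_num_layers_from_encoder_sd_py (enc_sd : List (String × Int)) : Int :=
  let keys := enc_sd.map (·.1)   -- all keys are str by the type convention, the isinstance filter keeps every key
  let layout := (pvLayerBlockCount keys 1, pvLayerBlockCount keys 2,
                 pvLayerBlockCount keys 3, pvLayerBlockCount keys 4)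
  let has_bottleneck := keys.any (fun k =>
    PySem.Str.startswith k "encoder.encoder.layer" && PySem.Str.isIn ".conv3." k)
  if layout = (2, 2, 2, 2) then 18
  else if layout = (3, 4, 6, 3) then (if has_bottleneck then 50 else 34)
  else if layout = (3, 4, 23, 3) then 101
  else if layout = (3, 8, 36, 3) then 152
  else if has_bottleneck then 50 else 18

-- ===== PORT B =====
-- B's loop body: parse one key, update (running-maxima dict, bottleneck flag).
def pvAltStep (st : PySem.Dict Int Int × Bool) (k : String) : PySem.Dict Int Int × Bool :=
  if PySem.Str.startswith k "encoder.encoder.layer" then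
    let st := if PySem.Str.isIn ".conv3." k then (st.1, true) else st
    let parts := (PySem.Str.splitMax? (PySem.Str.slice k (some ((PySem.Str.len "encoder.encoder.layer" : Int))) none) "." 1).getD []
    if parts.length == 2 && (parts.headD "" == "1" || parts.headD "" == "2" || parts.headD "" == "3" || parts.headD "" == "4") then
      let block := ((PySem.Str.splitMax? (parts.getD 1 "") "." 1).getD []).headD ""
      if PySem.Str.strIsdigit block then
        let i := (PySem.Int.ofStr? (parts.headD "")).getD 0
        let b := (PySem.Int.ofStr? block).getD 0
        match st.1.get? i with
        | none => (st.1.insert i b, st.2)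
        | some m => if m < b then (st.1.insert i b, st.2) else st
      else st
    else st
  else st

def infer_spidepth_num_layers_from_encoder_sd_py_alt (enc_sd : List (String × Int)) : Int :=
  let st := enc_sd.foldl (fun st kv => pvAltStep st kv.1) (PySem.Dict.empty, false)
  let lay : Int → Int := fun i => match st.1.get? i with | some m => m + 1 | none => 0
  let layout := (lay 1, lay 2, lay 3, lay 4)
  let has_bottleneck := st.2
  if layout = (2, 2, 2, 2) then 18
  else if layout = (3, 4, 6, 3) then (if has_bottleneck then 50 else 34)
  else if layout = (3, 4, 23, 3) then 101
  else if layout = (3, 8, 36, 3) then 152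
  else if has_bottleneck then 50 else 18

-- ===== PRECONDITION & SPEC =====
def Spec_infer_spidepth_num_layers_from_encoder_sd_py (enc_sd : List (String × Int)) (out : Int) : Prop := out = infer_spidepth_num_layers_from_encoder_sd_py_alt enc_sd
instance (enc_sd : List (String × Int)) (out : Int) : Decidable (Spec_infer_spidepth_num_layers_from_encoder_sd_py enc_sd out) := by unfold Spec_infer_spidepth_num_layers_from_encoder_sd_py; infer_instance

-- ===== CLAIM (what is proved, stated in full; the proofs are below) =====
def Claim_equal_infer_spidepth_num_layers_from_encoder_sd_py : Prop := ∀ (enc_sd : List (String × Int)), Dom_infer_spidepth_num_layers_from_encoder_sd_py enc_sd → Spec_infer_spidepth_num_layers_from_encoder_sd_py enc_sd (infer_spidepth_num_layers_from_encoder_sd_py enc_sd)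

-- ===== LEMMAS AND PROOFS =====

-- the common key prefix, as a char list
def pvPL : List Char := "encoder.encoder.layer".toList

-- A's per-key extraction for the layer whose digit is c, at char level
def pvContribC (c : Char) (cs : List Char) : Option Int :=
  if (pvPL ++ [c, '.']).isPrefixOf cs then
    let block := (PySem.Chars.splitOnMax (cs.drop 23) ['.'] 1).headD []
    if PySem.Chars.strIsdigit block then some ((PySem.Int.ofChars? block).getD 0) else none
  else none

-- B's per-key parse, at char level
def pvBparseC (cs : List Char) : Option (Int × Int) :=
  if pvPL.isPrefixOf cs then
    let parts := PySem.Chars.splitOnMax (cs.drop 21) ['.'] 1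
    if parts.length == 2 && (parts.headD [] == ['1'] || parts.headD [] == ['2'] || parts.headD [] == ['3'] || parts.headD [] == ['4']) then
      let block := (PySem.Chars.splitOnMax (parts.getD 1 []) ['.'] 1).headD []
      if PySem.Chars.strIsdigit block then
        some ((PySem.Int.ofChars? (parts.headD [])).getD 0, (PySem.Int.ofChars? block).getD 0)
      else none
    else none
  else none

-- B's running-max combine
def pvMfold (o : Option Int) (l : List Int) : Option Int :=
  l.foldl (fun acc x => match acc with | none => some x | some m => if m < x then some x else some m) o

theorem pv_go_zero (fuel : Nat) (l cur : List Char) (acc : List (List Char)) :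
    PySem.Chars.splitOnMax.go ['.'] fuel 0 l cur acc = ((cur.reverse ++ l) :: acc).reverse := by
  cases fuel with
  | zero => rw [PySem.Chars.splitOnMax.go.eq_def]
  | succ f => cases l with
    | nil => rw [PySem.Chars.splitOnMax.go.eq_def]; simp
    | cons c rest => rw [PySem.Chars.splitOnMax.go.eq_def]; simp

theorem pv_go_one (fuel : Nat) (l cur : List Char) (acc : List (List Char)) (h : l.length < fuel) :
    PySem.Chars.splitOnMax.go ['.'] fuel 1 l cur acc =
      acc.reverse ++ (if '.' ∈ l then [cur.reverse ++ l.takeWhile (· ≠ '.'), (l.dropWhile (· ≠ '.')).tail]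
        else [cur.reverse ++ l]) := by
  induction fuel generalizing l cur acc with
  | zero => omega
  | succ f ih =>
    cases l with
    | nil => rw [PySem.Chars.splitOnMax.go.eq_def]; simp
    | cons c rest =>
      rw [PySem.Chars.splitOnMax.go.eq_def]
      by_cases hc : c = '.'
      · subst hc
        simp [List.isPrefixOf, pv_go_zero]
      · have hpre : List.isPrefixOf ['.'] (c :: rest) = false := by
          simp [List.isPrefixOf]
          exact fun h => absurd h.symm hc
        simp only [hpre, Bool.false_eq_true, if_false, if_neg (by omega : ¬ (1 : Nat) = 0)]
        rw [ih rest (c :: cur) acc (by simpa using Nat.lt_of_succ_lt_succ h)]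
        have hc' : ¬('.' = c) := fun h => hc h.symm
        simp [hc, hc']

theorem pv_split1 (r : List Char) :
    PySem.Chars.splitOnMax r ['.'] 1 =
      if '.' ∈ r then [r.takeWhile (· ≠ '.'), (r.dropWhile (· ≠ '.')).tail] else [r] := by
  rw [PySem.Chars.splitOnMax]
  norm_num
  rw [pv_go_one _ _ _ _ (by omega)]
  simp

-- one step of B's loop, split into the pvBparseC parse and the dict/flag update
theorem pv_step_eq (st : PySem.Dict Int Int × Bool) (k : String) :
    pvAltStep st k =
      ((match pvBparseC k.toList with
        | some (i, bv) => (match st.1.get? i with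
                           | none => st.1.insert i bv
                           | some m => if m < bv then st.1.insert i bv else st.1)
        | none => st.1),
       st.2 || (PySem.Str.startswith k "encoder.encoder.layer" && PySem.Str.isIn ".conv3." k)) := by
  unfold pvAltStep pvBparseC
  have hsw : PySem.Str.startswith k "encoder.encoder.layer" = pvPL.isPrefixOf k.toList := by
    simp [pvPL, PySem.Chars.startswith]
  by_cases hp : pvPL.isPrefixOf k.toList
  case neg =>
    have hpf : pvPL.isPrefixOf k.toList = false := by
      simp only [Bool.not_eq_true] at hp; exact hp
    simp only [hsw, hpf, Bool.false_eq_true, if_false, Bool.false_and, Bool.or_false]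
  have hparts : (PySem.Str.splitMax? (PySem.Str.slice k (some ((PySem.Str.len "encoder.encoder.layer" : Int))) none) "." 1).getD []
      = (PySem.Chars.splitOnMax (k.toList.drop 21) ['.'] 1).map String.ofList := by
    simp [PySem.Str.splitMax?, PySem.Chars.splitMax?, PySem.Str.toList_slice, PySem.List.slice_from]
  have hst1 : ∀ b : Bool, (if b = true then (st.1, true) else st).1 = st.1 := by
    intro b; cases b <;> rfl
  have hst2 : ∀ b : Bool, (if b = true then (st.1, true) else st).2 = (st.2 || b) := by
    intro b; cases b <;> simp
  have hpt : pvPL.isPrefixOf k.toList = true := hp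
  simp only [hsw, hpt, if_true, hparts, hst1, hst2, Bool.true_and]
  rcases hsp : PySem.Chars.splitOnMax (k.toList.drop 21) ['.'] 1 with _ | ⟨t1, _ | ⟨t2, rest⟩⟩
  · exact Prod.ext (hst1 _) (hst2 _)
  · exact Prod.ext (hst1 _) (hst2 _)
  · -- two-or-more pieces (in fact rest = [] by pv_split1, but not needed)
    by_cases hlen : rest = []
    · subst hlen
      simp only [List.map_cons, List.map_nil, List.length_cons, List.length_nil, List.headD_cons, List.getD]
      have hseg : ∀ t : List Char, (String.ofList t1 == String.ofList t) = (t1 == t) := by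
        intro t; simp [String.ofList_inj]
      have h1 : ("1" : String) = String.ofList ['1'] := by decide
      have h2 : ("2" : String) = String.ofList ['2'] := by decide
      have h3 : ("3" : String) = String.ofList ['3'] := by decide
      have h4 : ("4" : String) = String.ofList ['4'] := by decide
      rw [h1, h2, h3, h4]
      simp only [hseg]
      by_cases hcond : (t1 == ['1'] || t1 == ['2'] || t1 == ['3'] || t1 == ['4']) = true
      · simp only [hcond, Bool.and_true, beq_self_eq_true]
        norm_num
        have hblock : (((PySem.Str.splitMax? (String.ofList t2) "." 1).getD []).head?.getD "")
            = String.ofList ((PySem.Chars.splitOnMax t2 ['.'] 1).head?.getD []) := by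
          rcases hq : PySem.Chars.splitOnMax t2 ['.'] 1 with _ | ⟨b1, brest⟩ <;>
            simp [PySem.Str.splitMax?, PySem.Chars.splitMax?, hq]
        rw [hblock]
        simp only [String.toList_ofList, PySem.Int.ofStr?]
        by_cases hd : PySem.Chars.strIsdigit ((PySem.Chars.splitOnMax t2 ['.'] 1).head?.getD []) = true
        · simp only [hd, if_true]
          cases hg : st.1.get? ((PySem.Int.ofChars? t1).getD 0) with
          | none => simp
          | some m =>
            by_cases hlt : m < (PySem.Int.ofChars? ((PySem.Chars.splitOnMax t2 ['.'] 1).head?.getD [])).getD 0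
            · simp [hlt]
            · simp only [hlt, if_false]
              exact Prod.ext (hst1 _) (hst2 _)
        · simp only [hd, Bool.false_eq_true, if_false]
          exact Prod.ext (hst1 _) (hst2 _)
      · simp only [Bool.not_eq_true] at hcond
        simp only [hcond, Bool.and_false, Bool.false_eq_true, if_false]
        exact Prod.ext (hst1 _) (hst2 _)
    · exfalso
      have := pv_split1 (k.toList.drop 21)
      rw [hsp] at this
      split at this <;> simp_all


-- the second state component is the running bottleneck flag
theorem pv_step_snd (st : PySem.Dict Int Int × Bool) (k : String) :
    (pvAltStep st k).2 = (st.2 || (PySem.Str.startswith k "encoder.encoder.layer" && PySem.Str.isIn ".conv3." k)) := by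
  rw [pv_step_eq]

-- the dict is updated exactly as pvBparseC prescribes
theorem pv_step_get (st : PySem.Dict Int Int × Bool) (k : String) (j : Int) :
    (pvAltStep st k).1.get? j =
      (match pvBparseC k.toList with
       | some (i, b) =>
         if j = i then (match st.1.get? i with
                        | none => some b
                        | some m => if m < b then some b else some m)
         else st.1.get? j
       | none => st.1.get? j) := by
  rw [pv_step_eq]
  rcases hbp : pvBparseC k.toList with _ | ⟨i, b⟩
  · rfl
  · simp only []
    by_cases hij : j = i
    · subst hij
      cases hg : st.1.get? j with
      | none => simp [PySem.Dict.get?_insert_self]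
      | some m =>
        by_cases hlt : m < b
        · simp [hlt, PySem.Dict.get?_insert_self]
        · simp [hlt, hg]
    · simp only [if_neg hij]
      cases hg : st.1.get? i with
      | none => simp [PySem.Dict.get?_insert_of_ne _ _ hij]
      | some m =>
        by_cases hlt : m < b
        · simp [hlt, PySem.Dict.get?_insert_of_ne _ _ hij]
        · simp [hlt]

-- a list containing '.' splits as (before, '.', after)
theorem pv_shape (r : List Char) (hdot : '.' ∈ r) :
    r = r.takeWhile (· ≠ '.') ++ '.' :: (r.dropWhile (· ≠ '.')).tail := by
  have h1 := List.takeWhile_append_dropWhile (p := fun x : Char => decide (x ≠ '.')) (l := r)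
  cases hd : r.dropWhile (· ≠ '.') with
  | nil =>
    exfalso
    rw [← h1] at hdot
    rcases List.mem_append.mp hdot with h | h
    · have := List.mem_takeWhile_imp (l := r) (p := fun x : Char => decide (x ≠ '.')) h
      simp at this
    · rw [hd] at h; simp at h
  | cons d tl =>
    have hdd : d = '.' := by
      have := List.head?_dropWhile_not (p := fun x : Char => decide (x ≠ '.')) (l := r)
      rw [hd] at this
      simpa using this
    conv_lhs => rw [← h1]
    rw [hd, hdd]
    simp

-- the heart: A's per-layer per-key extraction = B's parse filtered to that layer
theorem pv_key (c : Char) (v : Int)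
    (hcv : (c, v) = ('1', 1) ∨ (c, v) = ('2', 2) ∨ (c, v) = ('3', 3) ∨ (c, v) = ('4', 4))
    (cs : List Char) :
    pvContribC c cs = (pvBparseC cs).bind (fun p => if p.1 = v then some p.2 else none) := by
  have hcdot : c ≠ '.' := by rcases hcv with h | h | h | h <;> (obtain ⟨h1, h2⟩ := Prod.ext_iff.mp h; (try simp only at h1); subst h1; decide)
  have hofc : PySem.Int.ofChars? [c] = some v := by
    rcases hcv with h | h | h | h <;> (obtain ⟨h1, h2⟩ := Prod.ext_iff.mp h; (try simp only at h1 h2); subst h1; subst h2; decide)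
  unfold pvContribC pvBparseC
  by_cases hp : pvPL.isPrefixOf cs = true
  case neg =>
    have hpf : pvPL.isPrefixOf cs = false := by simp only [Bool.not_eq_true] at hp; exact hp
    have hpf2 : (pvPL ++ [c, '.']).isPrefixOf cs = false := by
      rw [Bool.eq_false_iff]
      intro hh
      rw [List.isPrefixOf_iff_prefix] at hh
      exact Bool.eq_false_iff.mp hpf (List.isPrefixOf_iff_prefix.mpr ((List.prefix_append pvPL [c, '.']).trans hh))
    simp [hpf, hpf2]
  case pos =>
    obtain ⟨r, rfl⟩ := List.isPrefixOf_iff_prefix.mp hp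
    have hd21 : (pvPL ++ r).drop 21 = r := by
      rw [show (21 : Nat) = pvPL.length from rfl, List.drop_left]
    have hd23 : (pvPL ++ r).drop 23 = r.drop 2 := by
      rw [show (23 : Nat) = pvPL.length + 2 from by decide, List.drop_append]
      simp [pvPL]
    have hpre2 : (pvPL ++ [c, '.']).isPrefixOf (pvPL ++ r) = [c, '.'].isPrefixOf r := by
      by_cases h : [c, '.'] <+: r
      · rw [List.isPrefixOf_iff_prefix.mpr ((List.prefix_append_right_inj pvPL).mpr h),
            List.isPrefixOf_iff_prefix.mpr h]
      · rw [Bool.eq_false_iff.mpr (fun hh => h ((List.prefix_append_right_inj pvPL).mp (List.isPrefixOf_iff_prefix.mp hh))),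
            Bool.eq_false_iff.mpr (fun hh => h (List.isPrefixOf_iff_prefix.mp hh))]
    rw [hpre2, hd21, hd23, pv_split1 r]
    simp only [hp, if_true]
    by_cases hdot : '.' ∈ r
    case neg =>
      have hpre3 : [c, '.'].isPrefixOf r = false :=
        Bool.eq_false_iff.mpr (fun hh => hdot ((List.isPrefixOf_iff_prefix.mp hh).subset (by simp)))
      simp [hdot, hpre3]
    case pos =>
      rw [if_pos hdot]
      have hshape := pv_shape r hdot
      set t1 := r.takeWhile (· ≠ '.') with ht1
      set t2 := (r.dropWhile (· ≠ '.')).tail with ht2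
      by_cases htc : t1 = [c]
      · have hr : r = c :: '.' :: t2 := by rw [hshape, htc]; rfl
        have hpre3 : [c, '.'].isPrefixOf r = true := by rw [hr]; simp [List.isPrefixOf]
        have hdrop2 : r.drop 2 = t2 := by rw [hr]; rfl
        have hcond : ((t1 == ['1']) || (t1 == ['2']) || (t1 == ['3']) || (t1 == ['4'])) = true := by
          rw [htc]
          rcases hcv with h | h | h | h <;>
            (obtain ⟨h1, h2⟩ := Prod.ext_iff.mp h; (try simp only at h1); subst h1; decide)
        simp only [hpre3, if_true, hdrop2, List.length_cons, List.length_nil, List.headD_cons,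
          List.getD_cons_succ, List.getD_cons_zero, htc, hofc]
        norm_num
        have hcd : c = '1' ∨ c = '2' ∨ c = '3' ∨ c = '4' := by
          rcases hcv with h | h | h | h <;> (obtain ⟨h1, h2⟩ := Prod.ext_iff.mp h; (try simp only at h1); subst h1; simp)
        split
        · rw [if_pos (by tauto)]
          simp
        · split <;> rfl
      · by_cases hdig : t1 = ['1'] ∨ t1 = ['2'] ∨ t1 = ['3'] ∨ t1 = ['4']
        · -- a different layer digit: A skips, B parses it but the filter throws it away
          have hvne : ¬((PySem.Int.ofChars? t1).getD 0 = v) := by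
            rcases hcv with h | h | h | h <;>
              (obtain ⟨h1, h2⟩ := Prod.ext_iff.mp h; (try simp only at h1 h2); subst h1; subst h2) <;>
              (rcases hdig with hx | hx | hx | hx <;> (first | (exact absurd hx htc) | (rw [hx]; decide)))
          have hpre3 : [c, '.'].isPrefixOf r = false := by
            rw [Bool.eq_false_iff]
            intro hh
            obtain ⟨tl, htl⟩ := List.isPrefixOf_iff_prefix.mp hh
            apply htc
            rcases hdig with hx | hx | hx | hx <;>
              (rw [hshape, hx] at htl; simp at htl; rw [hx, htl.1])
          have hcond : ((t1 == ['1']) || (t1 == ['2']) || (t1 == ['3']) || (t1 == ['4'])) = true := by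
            rcases hdig with hx | hx | hx | hx <;> simp [hx]
          simp only [hpre3, Bool.false_eq_true, if_false, List.length_cons, List.length_nil,
            List.headD_cons, List.getD_cons_succ, List.getD_cons_zero, hcond, Bool.and_true]
          norm_num
          split
          · simp [hvne]
          · rfl
        · simp only [not_or] at hdig
          obtain ⟨hd1, hd2, hd3, hd4⟩ := hdig
          have hcond : ((t1 == ['1']) || (t1 == ['2']) || (t1 == ['3']) || (t1 == ['4'])) = false := by
            simp [hd1, hd2, hd3, hd4]
          have hpre3 : [c, '.'].isPrefixOf r = false := by
            rw [Bool.eq_false_iff]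
            intro hh
            obtain ⟨tl, htl⟩ := List.isPrefixOf_iff_prefix.mp hh
            apply htc
            rw [ht1, ← htl]
            simp [hcdot]
          simp only [hpre3, Bool.false_eq_true, if_false, List.length_cons, List.length_nil,
            List.headD_cons, hcond, Bool.and_false]
          norm_num


-- A's loop body appends exactly the pvContribC extraction
theorem pv_bodyA (c : Char) (pfx : String) (hpfx : pfx.toList = pvPL ++ [c, '.'])
    (hlen : (PySem.Str.len pfx : Int) = 23) (ids : List Int) (k : String) :
    (if !(PySem.Str.startswith k pfx) then ids
     else
       let tail := PySem.Str.slice k (some ((PySem.Str.len pfx : Int))) none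
       let block := ((PySem.Str.splitMax? tail "." 1).getD []).headD ""
       if PySem.Str.strIsdigit block then ids ++ [(PySem.Int.ofStr? block).getD 0] else ids)
    = ids ++ (pvContribC c k.toList).toList := by
  unfold pvContribC
  have hsw : PySem.Chars.startswith k.toList pfx.toList = (pvPL ++ [c, '.']).isPrefixOf k.toList := by
    rw [hpfx]; rfl
  by_cases hswb : (pvPL ++ [c, '.']).isPrefixOf k.toList
  case neg =>
    have hswf : (pvPL ++ [c, '.']).isPrefixOf k.toList = false := by
      simp only [Bool.not_eq_true] at hswb; exact hswb
    simp [hsw, hswf]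
  case pos =>
    have hswt : (pvPL ++ [c, '.']).isPrefixOf k.toList = true := hswb
    have hblk : (((PySem.Str.splitMax? (PySem.Str.slice k (some (23 : Int)) none) "." 1).getD []).head?.getD "")
        = String.ofList ((PySem.Chars.splitOnMax (k.toList.drop 23) ['.'] 1).head?.getD []) := by
      rcases hq : PySem.Chars.splitOnMax (k.toList.drop 23) ['.'] 1 with _ | ⟨b1, brest⟩ <;>
        simp [PySem.Str.splitMax?, PySem.Chars.splitMax?, PySem.Str.toList_slice, PySem.List.slice_from, hq]
    rw [hlen]
    simp only [PySem.Str.startswith_eq, hsw, hswt, Bool.not_true, Bool.false_eq_true, if_false, if_true,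
      List.headD_eq_head?_getD, hblk, PySem.Str.strIsdigit_eq, String.toList_ofList, PySem.Int.ofStr?]
    split <;> simp

-- A's foldl builds exactly the filterMap of pvContribC
theorem pv_lbc (keys : List String) (c : Char) (v : Int)
    (hcv : (c, v) = ('1', 1) ∨ (c, v) = ('2', 2) ∨ (c, v) = ('3', 3) ∨ (c, v) = ('4', 4)) :
    pvLayerBlockCount keys v =
      (match pvMfold none ((keys.map String.toList).filterMap (pvContribC c)) with
       | some m => m + 1
       | none => 0) := by
  have hmax : ∀ l : List Int, PySem.List.max? l id = pvMfold none l := by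
    intro l
    rw [PySem.List.max?, pvMfold]
    exact PySem.List.foldl_congr_mem _ _ _ _ (by intro acc x _; cases acc <;> rfl)
  have main : ("encoder.encoder.layer" ++ PySem.Int.toStr v ++ ".").toList = pvPL ++ [c, '.'] →
      (PySem.Str.len ("encoder.encoder.layer" ++ PySem.Int.toStr v ++ ".") : Int) = 23 →
      pvLayerBlockCount keys v =
        (match pvMfold none ((keys.map String.toList).filterMap (pvContribC c)) with
         | some m => m + 1
         | none => 0) := by
    intro hpfx hlen
    have hfold := PySem.List.foldl_congr_mem keys
      (fun ids k =>
        if !(PySem.Str.startswith k ("encoder.encoder.layer" ++ PySem.Int.toStr v ++ ".")) then ids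
        else
          let tail := PySem.Str.slice k (some ((PySem.Str.len ("encoder.encoder.layer" ++ PySem.Int.toStr v ++ ".") : Int))) none
          let block := ((PySem.Str.splitMax? tail "." 1).getD []).headD ""
          if PySem.Str.strIsdigit block then ids ++ [(PySem.Int.ofStr? block).getD 0] else ids)
      (fun ids k => ids ++ (pvContribC c k.toList).toList) []
      (fun ids k _ => pv_bodyA c _ hpfx hlen ids k)
    simp only [pvLayerBlockCount, hfold]
    rw [PySem.List.foldl_append_eq_flatMap, List.nil_append, ← List.filterMap_eq_flatMap_toList,
      hmax, List.filterMap_map]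
    rfl
  rcases hcv with h | h | h | h <;>
    (obtain ⟨hc, hv⟩ := Prod.ext_iff.mp h; simp only at hc hv; subst hc; subst hv) <;>
    exact main (by decide) (by decide)

theorem pv_fold_get (keys : List String) (st : PySem.Dict Int Int × Bool) (j : Int) :
    (keys.foldl pvAltStep st).1.get? j =
      pvMfold (st.1.get? j)
        ((keys.map String.toList).filterMap (fun cs => (pvBparseC cs).bind (fun p => if p.1 = j then some p.2 else none))) := by
  induction keys generalizing st with
  | nil => rfl
  | cons k ks ih =>
    simp only [List.foldl_cons, List.map_cons, List.filterMap_cons]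
    rw [ih, pv_step_get]
    rcases hbp : pvBparseC k.toList with _ | ⟨i, b⟩
    · rfl
    · simp only [Option.bind_some]
      by_cases hij : i = j
      · subst hij
        rw [if_pos rfl, if_pos rfl]
        rfl
      · rw [if_neg hij, if_neg (fun h => hij h.symm)]

theorem pv_fold_snd (keys : List String) (st : PySem.Dict Int Int × Bool) :
    (keys.foldl pvAltStep st).2 =
      (st.2 || keys.any (fun k => PySem.Str.startswith k "encoder.encoder.layer" && PySem.Str.isIn ".conv3." k)) := by
  induction keys generalizing st with
  | nil => simp
  | cons k ks ih =>
    simp only [List.foldl_cons, List.any_cons]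
    rw [ih, pv_step_snd, Bool.or_assoc]

-- ===== VERDICT (by name: the statement is the Claim_ definition above) =====
theorem infer_spidepth_num_layers_from_encoder_sd_py_spec : Claim_equal_infer_spidepth_num_layers_from_encoder_sd_py := by
  intro enc_sd _
  unfold Spec_infer_spidepth_num_layers_from_encoder_sd_py
  unfold infer_spidepth_num_layers_from_encoder_sd_py infer_spidepth_num_layers_from_encoder_sd_py_alt
  have hfold : enc_sd.foldl (fun st kv => pvAltStep st kv.1) (PySem.Dict.empty, false)
      = (enc_sd.map (·.1)).foldl pvAltStep (PySem.Dict.empty, false) := by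
    rw [List.foldl_map]
  set keys := enc_sd.map (·.1) with hkeys
  have hemp : ∀ j : Int, (PySem.Dict.empty (κ := Int) (ν := Int)).get? j = none := by
    intro j; rfl
  have hlay : ∀ (c : Char) (v : Int),
      ((c, v) = ('1', 1) ∨ (c, v) = ('2', 2) ∨ (c, v) = ('3', 3) ∨ (c, v) = ('4', 4)) →
      pvLayerBlockCount keys v =
        (match (keys.foldl pvAltStep (PySem.Dict.empty, false)).1.get? v with
         | some m => m + 1 | none => 0) := by
    intro c v hcv
    rw [pv_fold_get, hemp, pv_lbc keys c v hcv]
    have : (keys.map String.toList).filterMap (pvContribC c)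
        = (keys.map String.toList).filterMap (fun cs => (pvBparseC cs).bind (fun p => if p.1 = v then some p.2 else none)) := by
      apply List.filterMap_congr
      intro cs _
      exact pv_key c v hcv cs
    rw [this]
  have h1 := hlay '1' 1 (by simp)
  have h2 := hlay '2' 2 (by simp)
  have h3 := hlay '3' 3 (by simp)
  have h4 := hlay '4' 4 (by simp)
  have hb := pv_fold_snd keys (PySem.Dict.empty, false)
  simp only [hfold, ← hkeys] at *
  rw [h1, h2, h3, h4, hb]
  simp
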